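-- pv_equiv track=rewrite | github.com/glenjarvis/ansible-simple-apt | src/modules/sapt.py | _parse_version_table
-- ===== SOURCE A (Python) =====
-- def _count_leading_spaces(line):
--     """Given a single line, return how many spaces are in front
--
--     Args:
--         line -- single line (typically from command line output)
--
--     Returns:
--         Number of spaces (int) preceeding the first non-space character
--     """
--     count = 0
--     for character in line:
--         count += 1
--         if character != " ":
--             break
--     return count
--
-- def _indents_from_list(version_list):
--     """Given lines beginning with a varied number of spaces, return sorted list of number of spaces
--
--     Args:
--         version_list -- raw strings representing versions. For example:
--             1.0.9.8.6 0
--                 500 http://security.debian.org/ jessie/updates/main amd64 Packages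
--
--     Returns:
--         Sorted number of preceeding spaces for each level of input (e.g., [4, 8])
--     """
--
--     indents = set()
--     for row in version_list:
--         indents.add(_count_leading_spaces(row))
--
--     return sorted(indents)
--
-- def _parse_version_table(raw_version_list):
--     """Given test of version table, create version_list
--
--     Args:
--         raw_version_list -- raw multi-line string representating output of
--             version table such as:
--                 Version table:
--                    1.0.9.8.6 0
--                       500 http://security.debian.org/ jessie/updates/main amd64 Packages
--                *** 1.0.9.8.5 0
--                       100 /var/lib/dpkg/status
--                    1.0.9.8.4 0
--                       500 http://httpredir.debian.org/debian/ jessie/main amd64 Packages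
--
--     Returns:
--         A list of versions from first level indent such as:
--             ["1.0.9.8.4", "1.0.9.8.5", "1.0.9.8.6"]
--
--     """
--     versions = []
--
--     # Replacing any '***' in the lines
--     version_list = [item.replace('*', ' ') for item in raw_version_list]
--
--     spaces = _indents_from_list(version_list)
--     assert len(spaces) >= 2  # Our assumptions from the input above
--
--     version_level = spaces[0]
--     for row in version_list:
--         if _count_leading_spaces(row) == version_level:
--             versions.append(row.strip().split()[0])
--
--     return versions
-- ===== SOURCE B (Python) =====
-- def _count_leading_spaces(line):
--     count = 0
--     for character in line:
--         count += 1
--         if character != " ":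
--             break
--     return count
--
--
-- def _parse_version_table(raw_version_list):
--     buckets = {}
--     for item in raw_version_list:
--         row = item.replace('*', ' ')
--         buckets.setdefault(_count_leading_spaces(row), []).append(row)
--     assert len(buckets) >= 2
--     return [row.strip().split()[0] for row in buckets[min(buckets)]]
-- ===== Notes on version B (the rewrite author's own statement) =====
-- stated objective: alternative
-- what changed: B groups the asterisk-replaced lines into a dict of buckets keyed by leading-space count in one pass and emits only the minimum-key bucket, instead of A's build-a-set, sort it, then rescan every line recomputing its count.
import Mathlib
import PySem

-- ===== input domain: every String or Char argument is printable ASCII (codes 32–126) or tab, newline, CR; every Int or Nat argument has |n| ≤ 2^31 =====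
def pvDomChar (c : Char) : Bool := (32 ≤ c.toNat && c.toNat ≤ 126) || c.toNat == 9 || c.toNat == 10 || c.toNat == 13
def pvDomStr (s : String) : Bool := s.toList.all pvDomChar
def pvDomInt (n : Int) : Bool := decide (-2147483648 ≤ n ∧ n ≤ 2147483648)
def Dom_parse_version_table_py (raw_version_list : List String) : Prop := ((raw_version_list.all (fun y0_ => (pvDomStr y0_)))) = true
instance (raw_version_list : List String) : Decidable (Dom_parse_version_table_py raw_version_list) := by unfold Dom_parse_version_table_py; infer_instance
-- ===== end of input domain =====

-- B groups the rows into a dict of buckets keyed by the leading-space count in ONE pass and emits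
-- the minimum-key bucket, instead of A's set + sorted + full rescan (alternative decomposition).

-- shared module helper _count_leading_spaces (count += 1 happens before the break)
def pvCLS : List Char → Nat
  | [] => 0
  | c :: rest => if c ≠ ' ' then 1 else 1 + pvCLS rest

-- ===== PORT A =====
def parse_version_table_py (raw_version_list : List String) : List String :=
  let version_list := raw_version_list.map (fun item => PySem.Str.replace item "*" " ")
  -- _indents_from_list: set built row by row, then sorted
  let indents : PySem.Set Nat :=
    version_list.foldl (fun s row => PySem.Set.add s (pvCLS row.toList)) PySem.Set.empty
  let spaces := PySem.List.sorted indents (fun x => x)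
  -- 'assert len(spaces) >= 2' raises AssertionError when it fails: excluded by Pre_
  let version_level := PySem.List.pyGetD spaces 0 0   -- spaces[0]; IndexError (spaces = []) outside Pre_
  version_list.foldl (fun versions row =>
    if pvCLS row.toList == version_level then
      -- row.strip().split()[0]; IndexError (blank row) outside Pre_
      versions ++ [PySem.List.pyGetD (PySem.Str.split₀ (PySem.Str.strip row)) 0 ""]
    else versions) []

-- ===== PORT B =====
def parse_version_table_py_alt (raw_version_list : List String) : List String :=
  let buckets : PySem.Dict Nat (List String) :=
    raw_version_list.foldl (fun d item =>
      let row := PySem.Str.replace item "*" " "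
      d.modify (pvCLS row.toList) [] (· ++ [row])) PySem.Dict.empty
  -- 'assert len(buckets) >= 2' raises when it fails: excluded by Pre_
  match PySem.List.min? buckets.keys (fun k => k) with
  | none => []   -- min([]) raises in Python: outside Pre_
  | some lo =>
      (buckets.getD lo []).map (fun row =>
        PySem.List.pyGetD (PySem.Str.split₀ (PySem.Str.strip row)) 0 "")

-- ===== PRECONDITION & SPEC =====
-- Pre_ = exactly the inputs on which the Python A returns: at least two distinct leading-space
-- counts (else the assert raises) and no minimal-count line blank (else split()[0] raises IndexError).
-- closed-form leading-indent measure: number of leading ' ' chars, plus one when the line has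
-- any other character (this is what _count_leading_spaces returns, stated via takeWhile)
def pvIndent (s : String) : Nat :=
  let k := (s.toList.takeWhile (fun c => c == ' ')).length
  if k = s.toList.length then k else k + 1

def Pre_parse_version_table_py (raw_version_list : List String) : Prop :=
  let rows := raw_version_list.map (fun item => PySem.Str.replace item "*" " ")
  2 ≤ (PySem.Set.ofList (rows.map pvIndent)).length ∧
  ∀ row ∈ rows, (∀ r ∈ rows, pvIndent row ≤ pvIndent r) →
    (PySem.Str.strip row).toList ≠ []
instance (raw_version_list : List String) : Decidable (Pre_parse_version_table_py raw_version_list) := by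
  unfold Pre_parse_version_table_py; infer_instance

def pvWitness_parse_version_table_py : List String := ["  1.0 0", " 2.0 0"]

def Spec_parse_version_table_py (raw_version_list : List String) (out : List String) : Prop := out = parse_version_table_py_alt raw_version_list
instance (raw_version_list : List String) (out : List String) : Decidable (Spec_parse_version_table_py raw_version_list out) := by unfold Spec_parse_version_table_py; infer_instance

-- ===== CLAIM (what is proved, stated in full; the proofs are below) =====
def Claim_equal_parse_version_table_py : Prop := ∀ (raw_version_list : List String), Dom_parse_version_table_py raw_version_list → Pre_parse_version_table_py raw_version_list → Spec_parse_version_table_py raw_version_list (parse_version_table_py raw_version_list)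

-- ===== LEMMAS AND PROOFS =====

-- the first element of a Python-sorted Nat list is its minimum (first extremal element)
theorem head_sorted_eq_min (S : List Nat) (m : Nat)
    (hm : PySem.List.min? S (fun k => k) = some m) :
    PySem.List.pyGetD (PySem.List.sorted S (fun x => x)) 0 0 = m := by
  have hS : S ≠ [] := by
    intro h; rw [(PySem.List.min?_eq_none_iff S _).mpr h] at hm; simp at hm
  have hnil : PySem.List.sorted S (fun x => x) ≠ [] := by
    simpa [PySem.List.sorted_eq_nil_iff] using hS
  obtain ⟨h, t, ht⟩ := List.exists_cons_of_ne_nil hnil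
  have hperm := PySem.List.sorted_perm S (fun x => x) false
  have hmem_h : h ∈ S := hperm.mem_iff.mp (by rw [ht]; exact List.mem_cons_self ..)
  have hmem_m : m ∈ PySem.List.sorted S (fun x => x) := hperm.mem_iff.mpr (PySem.List.min?_mem hm)
  have hpw := PySem.List.sorted_pairwise S (fun x => x)
  rw [ht] at hpw hmem_m
  have h_le_m : h ≤ m := by
    rcases List.mem_cons.mp hmem_m with rfl | hm'
    · exact le_refl _
    · exact (List.pairwise_cons.mp hpw).1 m hm'
  have m_le_h : m ≤ h := PySem.List.min?_isMin hm h hmem_h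
  rw [ht, PySem.List.pyGetD_zero_cons]
  omega

theorem parse_version_table_py_spec_aux (raw : List String) :
    parse_version_table_py raw = parse_version_table_py_alt raw := by
  unfold parse_version_table_py parse_version_table_py_alt
  have hb : raw.foldl (fun d item =>
        PySem.Dict.modify d (pvCLS (PySem.Str.replace item "*" " ").toList) []
          (· ++ [PySem.Str.replace item "*" " "])) PySem.Dict.empty
      = ((raw.map (fun item => PySem.Str.replace item "*" " ")).map
            (fun row => (pvCLS row.toList, row))).foldl
          (fun d p => PySem.Dict.modify d p.1 [] (· ++ [p.2])) PySem.Dict.empty := by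
    simp [List.foldl_map]
  rw [hb]
  have ha : ∀ (rows : List String), rows.foldl (fun s row => PySem.Set.add s (pvCLS row.toList)) PySem.Set.empty
      = PySem.Set.ofList (rows.map (fun row => pvCLS row.toList)) := fun rows => by
    simp [PySem.Set.ofList_eq_foldl, List.foldl_map, PySem.Set.empty]
  have hk : ∀ (l : List (Nat × String)),
      (List.foldl (fun d p => PySem.Dict.modify d p.1 [] fun x => x ++ [p.2]) PySem.Dict.empty l).keys
        = PySem.Set.ofList (l.map Prod.fst) := fun l => by
    rw [PySem.Dict.keys_foldl_modify_key l Prod.fst [] (fun d p => fun x => x ++ [p.2])]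
    simp [PySem.Set.update_nil_left, PySem.Dict.keys_empty]
  dsimp only
  rw [ha, hk]
  simp only [List.map_map, Function.comp_def]
  set S := PySem.Set.ofList (raw.map (fun item => pvCLS (PySem.Str.replace item "*" " ").toList)) with hS
  cases hmin : PySem.List.min? S (fun k => k) with
  | none =>
    have hS0 : S = [] := (PySem.List.min?_eq_none_iff S _).mp hmin
    have hraw : raw = [] := by
      cases raw with
      | nil => rfl
      | cons x xs =>
        exfalso
        rw [hS, List.map_cons, PySem.Set.ofList_cons] at hS0
        simp at hS0
    subst hraw; simp
  | some lo =>
    rw [head_sorted_eq_min S lo hmin]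
    simp [PySem.Dict.getD_foldl_modify_append, PySem.List.foldl_append_ite,
      List.filter_map, List.map_map, Function.comp_def]
    congr 1

-- ===== VERDICT (by name: the statement is the Claim_ definition above) =====
theorem parse_version_table_py_spec : Claim_equal_parse_version_table_py := by
  intro raw _ _
  exact parse_version_table_py_spec_aux raw
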